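-- pv_equiv track=rewrite | github.com/must-ps/lee-jun-hee | submission/06_기능개발.py | solution
-- ===== SOURCE A (Python) =====
-- import math
-- import math
--
-- def solution(progresses, speeds):
--     answer = []
--     required_days = []
--     for i in range(len(progresses)):
--         required_days.append(math.ceil((100-progresses[i])/speeds[i])) # 올림처리
--
--     tmp_biggest = required_days[0]
--     release_amount = 0
--     for i in range(len(required_days)):
--         if required_days[i] <= tmp_biggest:
--             release_amount+=1
--             if i==(len(required_days)-1):
--                 answer.append(release_amount)
--         else:
--             answer.append(release_amount)
--             release_amount = 1
--             if i==(len(required_days)-1):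
--                 answer.append(release_amount)
--             else:
--                 tmp_biggest = required_days[i]
--
--     return answer
-- ===== SOURCE B (Python) =====
-- import math
-- from collections import deque
--
-- def solution(progresses, speeds):
--     days = deque(math.ceil((100 - p) / s) for p, s in zip(progresses, speeds))
--     answer = []
--     leader = days.popleft()  # raises IndexError on empty input, like A
--     while True:
--         count = 1
--         while days and days[0] <= leader:
--             days.popleft()
--             count += 1
--         answer.append(count)
--         if days:
--             leader = days.popleft()
--         else:
--             break
--     return answer
-- ===== Notes on version B (the rewrite author's own statement) =====
-- stated objective: alternative
-- what changed: Replaces A's flat indexed pass with index/is-last bookkeeping and a running-max variable by a nested queue-consumption traversal: pop a group leader from a deque, inner while-loop pops and counts all followers with days <= leader, append the count, repeat with the next leader.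
import Mathlib
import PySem

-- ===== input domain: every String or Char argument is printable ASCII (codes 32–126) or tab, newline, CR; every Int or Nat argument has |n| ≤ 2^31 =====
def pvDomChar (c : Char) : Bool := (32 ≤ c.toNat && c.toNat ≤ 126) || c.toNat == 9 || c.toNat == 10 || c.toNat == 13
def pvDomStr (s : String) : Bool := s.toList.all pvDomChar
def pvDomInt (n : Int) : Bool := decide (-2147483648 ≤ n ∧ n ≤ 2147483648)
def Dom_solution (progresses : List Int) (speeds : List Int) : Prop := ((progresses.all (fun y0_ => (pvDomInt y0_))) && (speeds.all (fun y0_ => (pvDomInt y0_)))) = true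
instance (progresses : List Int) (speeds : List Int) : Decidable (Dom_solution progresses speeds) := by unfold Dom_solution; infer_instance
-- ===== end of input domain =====

-- B changes the decomposition only (same O(n) cost): a nested queue-consumption traversal
-- (pop a leader, inner loop pops+counts followers) instead of A's flat indexed pass with
-- running-max / is-last-index bookkeeping. Equivalence is proved on Pre_ (no exception).

-- math.ceil((100-p)/s) for python ints: exact, since on Dom (|p| ≤ 2^31, |s| ≤ 2^31) the
-- float quotient never rounds across an integer, so ceil((100-p)/s) = -((p-100)//s).
def ceilDays (p : Int) (s : Int) : Int := -(PySem.Int.floordiv (p - 100) s)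

-- ===== PORT A =====
-- the body of A's second for-loop (index i over required_days, state (answer, tmp_biggest, release_amount))
def stepA (rd : List Int) (n : Int) (st : List Int × Int × Int) (i : Int) : List Int × Int × Int :=
  let d := PySem.List.pyGetD rd i 0
  if d ≤ st.2.1 then
    let rel := st.2.2 + 1
    if i = n - 1 then (st.1 ++ [rel], st.2.1, rel) else (st.1, st.2.1, rel)
  else
    let ans := st.1 ++ [st.2.2]
    if i = n - 1 then (ans ++ [1], st.2.1, 1) else (ans, d, 1)

def solution (progresses : List Int) (speeds : List Int) : List Int :=
  let required_days := (PySem.List.pyRange 0 (progresses.length : Int) 1).map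
    (fun i => ceilDays (PySem.List.pyGetD progresses i 0) (PySem.List.pyGetD speeds i 0))
  -- required_days[0] raises IndexError on empty input: excluded by Pre_ (default 0 unused there)
  let tmp_biggest := PySem.List.pyGetD required_days 0 0
  ((PySem.List.pyRange 0 (required_days.length : Int) 1).foldl
    (stepA required_days (required_days.length : Int)) ([], tmp_biggest, 0)).1

-- ===== PORT B =====
-- inner while-loop: pop and count every follower with days[0] <= leader
def consume (leader : Int) (days : List Int) (count : Int) : Int × List Int :=
  match days with
  | [] => (count, [])
  | d :: rest => if d ≤ leader then consume leader rest (count + 1) else (count, d :: rest)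

theorem consume_snd_length (leader : Int) (days : List Int) (count : Int) :
    (consume leader days count).2.length ≤ days.length := by
  induction days generalizing count with
  | nil => simp [consume]
  | cons d rest ih =>
    simp only [consume]
    split
    · exact le_trans (ih _) (by simp)
    · simp

-- outer while-loop: append the group count, then continue with the next leader if any
def outer (leader : Int) (days : List Int) (answer : List Int) : List Int :=
  let r := consume leader days 1
  let answer' := answer ++ [r.1]
  match h : r.2 with
  | [] => answer'
  | l :: rest => outer l rest answer'
termination_by days.length
decreasing_by
  have := consume_snd_length leader days 1
  rw [h] at this
  simp at this
  omega

def solution_alt (progresses : List Int) (speeds : List Int) : List Int :=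
  let days := (progresses.zip speeds).map (fun ps => ceilDays ps.1 ps.2)
  match days with
  | [] => []  -- Python raises IndexError here (popleft on empty); excluded by Pre_
  | l :: rest => outer l rest []

-- ===== PRECONDITION & SPEC =====
-- Pre_ excludes exactly the inputs where A raises: empty progresses (IndexError on
-- required_days[0]), speeds shorter than progresses (IndexError), and a zero speed used by
-- the loop (ZeroDivisionError).
def Pre_solution (progresses : List Int) (speeds : List Int) : Prop :=
  progresses ≠ [] ∧ progresses.length ≤ speeds.length ∧
    ∀ s ∈ speeds.take progresses.length, s ≠ 0

instance (progresses : List Int) (speeds : List Int) : Decidable (Pre_solution progresses speeds) := by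
  unfold Pre_solution; infer_instance

def pvWitness_solution : List Int × List Int := ([93, 30, 55], [1, 30, 5])

def Spec_solution (progresses : List Int) (speeds : List Int) (out : List Int) : Prop := out = solution_alt progresses speeds
instance (progresses : List Int) (speeds : List Int) (out : List Int) : Decidable (Spec_solution progresses speeds out) := by unfold Spec_solution; infer_instance

-- ===== CLAIM (what is proved, stated in full; the proofs are below) =====
def Claim_equal_solution : Prop := ∀ (progresses : List Int) (speeds : List Int), Dom_solution progresses speeds → Pre_solution progresses speeds → Spec_solution progresses speeds (solution progresses speeds)

-- ===== LEMMAS AND PROOFS =====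

-- "continue the run with current leader tmp and current count rel": B's computation from the
-- middle of an inner while-loop
def cont (tmp : Int) (ds : List Int) (rel : Int) (ans : List Int) : List Int :=
  let r := consume tmp ds rel
  match r.2 with
  | [] => ans ++ [r.1]
  | l :: rest => outer l rest (ans ++ [r.1])

theorem outer_eq_cont (leader : Int) (days : List Int) (answer : List Int) :
    outer leader days answer = cont leader days 1 answer := by
  rw [outer, cont]
  cases hc : (consume leader days 1).2 <;> simp [hc]

theorem cont_cons_le {tmp d : Int} (ds : List Int) (rel : Int) (ans : List Int)
    (h : d ≤ tmp) : cont tmp (d :: ds) rel ans = cont tmp ds (rel + 1) ans := by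
  simp only [cont, consume, if_pos h]

theorem cont_cons_gt {tmp d : Int} (ds : List Int) (rel : Int) (ans : List Int)
    (h : ¬ d ≤ tmp) : cont tmp (d :: ds) rel ans = outer d ds (ans ++ [rel]) := by
  simp only [cont, consume, if_neg h]

-- A's loop over the index suffix [k, n) equals B's mid-inner-loop continuation on rd.drop k
theorem foldA_eq_cont (rd : List Int) (k : Nat) (hk : k < rd.length)
    (ans : List Int) (tmp rel : Int) :
    ((PySem.List.pyRange (k : Int) (rd.length : Int) 1).foldl
      (stepA rd (rd.length : Int)) (ans, tmp, rel)).1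
      = cont tmp (rd.drop k) rel ans := by
  induction hn : rd.length - k generalizing k ans tmp rel with
  | zero => omega
  | succ m ih =>
    have hklt : (k : Int) < (rd.length : Int) := by exact_mod_cast hk
    rw [PySem.List.pyRange_one_cons hklt]
    have hd : PySem.List.pyGetD rd (k : Int) 0 = rd[k] := by
      rw [PySem.List.pyGetD_natCast]
      simp [List.getD_eq_getElem?_getD, hk]
    have hdrop : rd.drop k = rd[k] :: rd.drop (k + 1) := (List.getElem_cons_drop hk).symm
    simp only [List.foldl_cons, stepA, hd]
    by_cases hle : rd[k] ≤ tmp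
    · rw [if_pos hle]
      by_cases hlast : (k : Int) = (rd.length : Int) - 1
      · have hk1 : k + 1 = rd.length := by omega
        rw [if_pos hlast, PySem.List.pyRange_one_eq_nil (by omega)]
        have : rd.drop k = [rd[k]] := by rw [hdrop, hk1]; simp
        rw [this, cont_cons_le _ _ _ hle]
        simp [cont, consume]
      · rw [if_neg hlast]
        have hk1 : k + 1 < rd.length := by omega
        have : ((k : Int) + 1) = ((k + 1 : Nat) : Int) := by push_cast; ring
        rw [this, ih (k + 1) hk1 ans tmp (rel + 1) (by omega), hdrop, cont_cons_le _ _ _ hle]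
    · rw [if_neg hle]
      by_cases hlast : (k : Int) = (rd.length : Int) - 1
      · have hk1 : k + 1 = rd.length := by omega
        rw [if_pos hlast, PySem.List.pyRange_one_eq_nil (by omega)]
        have : rd.drop k = [rd[k]] := by rw [hdrop, hk1]; simp
        rw [this, cont_cons_gt _ _ _ hle]
        simp [outer_eq_cont, cont, consume]
      · rw [if_neg hlast]
        have hk1 : k + 1 < rd.length := by omega
        have : ((k : Int) + 1) = ((k + 1 : Nat) : Int) := by push_cast; ring
        rw [this, ih (k + 1) hk1 (ans ++ [rel]) rd[k] 1 (by omega), hdrop,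
          cont_cons_gt _ _ _ hle, outer_eq_cont]

-- under Pre_, A's index-built required_days equals B's zip-built days
theorem rd_eq (p s : List Int) (hle : p.length ≤ s.length) :
    (PySem.List.pyRange 0 (p.length : Int) 1).map
      (fun i => ceilDays (PySem.List.pyGetD p i 0) (PySem.List.pyGetD s i 0))
      = (p.zip s).map (fun ps => ceilDays ps.1 ps.2) := by
  apply List.ext_getElem
  · simp [PySem.List.length_pyRange_one, List.length_zip]
    omega
  · intro i h1 h2
    have hip : i < p.length := by
      simpa [PySem.List.length_pyRange_one] using h1
    have his : i < s.length := by omega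
    simp only [List.getElem_map, PySem.List.getElem_pyRange_one, List.getElem_zip]
    have : (0 : Int) + (i : Int) = ((i : Nat) : Int) := by ring
    rw [this, PySem.List.pyGetD_natCast, PySem.List.pyGetD_natCast]
    simp [List.getD_eq_getElem?_getD, hip, his]

-- ===== VERDICT (by name: the statement is the Claim_ definition above) =====
theorem solution_spec : Claim_equal_solution := by
  intro p s _ ⟨hne, hle, _⟩
  unfold Spec_solution solution solution_alt
  rw [rd_eq p s hle]
  set rd := (p.zip s).map (fun ps => ceilDays ps.1 ps.2) with hrd
  have hlen : rd.length = p.length := by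
    simp [hrd, List.length_zip]; omega
  have hpos : 0 < rd.length := by
    rw [hlen]; exact List.length_pos_of_ne_nil hne
  obtain ⟨h, t, hht⟩ : ∃ h t, rd = h :: t := by
    cases hcase : rd with
    | nil => rw [hcase] at hpos; simp at hpos
    | cons h t => exact ⟨h, t, rfl⟩
  have h0 : PySem.List.pyGetD rd 0 0 = h := by rw [hht]; exact PySem.List.pyGetD_zero_cons h t 0
  have := foldA_eq_cont rd 0 hpos [] (PySem.List.pyGetD rd 0 0) 0
  simp only [Nat.cast_zero] at this
  rw [this, h0, List.drop_zero, hht, cont_cons_le _ _ _ (le_refl h)]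
  norm_num
  exact (outer_eq_cont h t []).symm
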